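-- pv_equiv track=rewrite | github.com/xiasong0501/seedance_prompt | scripts/generate_art_assets.py | build_character_presence_map
-- ===== SOURCE A (Python) =====
-- from typing import Any, Mapping
--
-- def build_character_presence_map(director_json: Mapping[str, Any]) -> dict[str, int]:
--     counts: dict[str, int] = {}
--     for story_point in list(director_json.get("story_points") or []):
--         if not isinstance(story_point, Mapping):
--             continue
--         seen_in_point: set[str] = set()
--         for raw_name in list(story_point.get("characters") or []):
--             name = str(raw_name or "").strip()
--             if not name or name in seen_in_point:
--                 continue
--             seen_in_point.add(name)
--             counts[name] = counts.get(name, 0) + 1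
--     return counts
-- ===== SOURCE B (Python) =====
-- from typing import Any, Mapping
--
-- def build_character_presence_map(director_json: Mapping[str, Any]) -> dict[str, int]:
--     # Different algorithm: no incremental counting at all.  Clean every point's
--     # character list once, derive the global first-appearance order of nonempty
--     # names, then compute each name's count as the NUMBER OF POINTS whose
--     # cleaned list contains it (a membership scan per name).
--     cleaned: list[list[str]] = [
--         [str(raw or "").strip() for raw in list(sp.get("characters") or [])]
--         for sp in list(director_json.get("story_points") or [])
--         if isinstance(sp, Mapping)
--     ]
--     order: list[str] = []
--     for lst in cleaned:
--         for name in lst: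
--             if name and name not in order:
--                 order.append(name)
--     return {name: sum(1 for lst in cleaned if name in lst) for name in order}
-- ===== Notes on version B (the rewrite author's own statement) =====
-- stated objective: alternative
-- what changed: A counts incrementally (per-point seen-set plus dict.get increments in one pass); B never increments: it cleans all character lists first, derives the global first-appearance order of nonempty names, and computes each name's count as the number of cleaned point lists containing it via a membership scan per name.
import Mathlib
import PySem

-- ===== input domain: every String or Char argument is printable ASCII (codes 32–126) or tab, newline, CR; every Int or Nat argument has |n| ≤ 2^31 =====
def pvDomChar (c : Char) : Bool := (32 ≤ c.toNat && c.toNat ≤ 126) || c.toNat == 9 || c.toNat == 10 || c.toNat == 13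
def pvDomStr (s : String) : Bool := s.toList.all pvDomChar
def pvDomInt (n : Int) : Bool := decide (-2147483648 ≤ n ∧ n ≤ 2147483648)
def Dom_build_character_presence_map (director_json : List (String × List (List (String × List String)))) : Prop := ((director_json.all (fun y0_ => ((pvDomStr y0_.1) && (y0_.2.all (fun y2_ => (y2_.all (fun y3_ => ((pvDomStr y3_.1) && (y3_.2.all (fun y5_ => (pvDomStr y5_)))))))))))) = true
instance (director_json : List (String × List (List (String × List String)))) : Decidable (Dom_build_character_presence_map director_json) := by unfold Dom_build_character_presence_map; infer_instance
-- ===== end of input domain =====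

-- B replaces A's one-pass incremental counting (seen-set + dict.get increment)
-- with a different algorithm: clean all lists, build the global first-appearance
-- order, then count each name by scanning which point lists contain it.

-- ===== PORT A =====
-- str(raw_name or "") is the identity on str inputs (and strip "" = ""), so the
-- cleaned name is strip(raw_name); isinstance(story_point, Mapping) is always
-- true under the type convention, so the `continue` branch never fires.
def build_character_presence_map (director_json : List (String × List (List (String × List String)))) : List (String × Int) :=
  let counts : PySem.Dict String Int :=
    (((PySem.Dict.mk director_json).get? "story_points").getD []).foldl
      (fun counts story_point =>
        ((((PySem.Dict.mk story_point).get? "characters").getD []).foldl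
          (fun (acc : PySem.Set String × PySem.Dict String Int) raw_name =>
            let name := PySem.Str.strip raw_name
            if name = "" ∨ PySem.Set.contains acc.1 name then acc
            else (PySem.Set.add acc.1 name, acc.2.insert name (acc.2.getD name 0 + 1)))
          (PySem.Set.empty, counts)).2)
      PySem.Dict.empty
  counts.items

-- ===== PORT B =====
def build_character_presence_map_alt (director_json : List (String × List (List (String × List String)))) : List (String × Int) :=
  let cleaned : List (List String) :=
    (((PySem.Dict.mk director_json).get? "story_points").getD []).map
      (fun sp => (((PySem.Dict.mk sp).get? "characters").getD []).map PySem.Str.strip)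
  let order : List String :=
    cleaned.foldl
      (fun order lst =>
        lst.foldl (fun order name => if name ≠ "" ∧ name ∉ order then order ++ [name] else order) order)
      []
  order.map (fun name => (name, (cleaned.countP (fun lst => decide (name ∈ lst)) : Int)))

-- ===== PRECONDITION & SPEC =====
def Spec_build_character_presence_map (director_json : List (String × List (List (String × List String)))) (out : List (String × Int)) : Prop := out = build_character_presence_map_alt director_json
instance (director_json : List (String × List (List (String × List String)))) (out : List (String × Int)) : Decidable (Spec_build_character_presence_map director_json out) := by unfold Spec_build_character_presence_map; infer_instance

-- ===== CLAIM (what is proved, stated in full; the proofs are below) =====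
def Claim_equal_build_character_presence_map : Prop := ∀ (director_json : List (String × List (List (String × List String)))), Dom_build_character_presence_map director_json → Spec_build_character_presence_map director_json (build_character_presence_map director_json)

-- ===== LEMMAS AND PROOFS =====

-- relative ordered dedup: first occurrences of elements of xs not already in `seen`
def pvDed (seen : List String) : List String → List String
  | [] => []
  | n :: rest =>
    if PySem.Set.contains seen n then pvDed seen rest
    else n :: pvDed (seen ++ [n]) rest

theorem pv_foldl_add (xs : List String) : ∀ (s : List String),
    xs.foldl PySem.Set.add s = s ++ pvDed s xs := by
  induction xs with
  | nil => intro s; simp [pvDed]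
  | cons x xs ih =>
    intro s
    by_cases hc : PySem.Set.contains s x
    · simp only [List.foldl_cons, PySem.Set.add, hc, if_pos, pvDed, ih]
    · simp only [List.foldl_cons, PySem.Set.add, hc, if_neg, if_false, pvDed, ih,
        Bool.false_eq_true, List.append_assoc, List.cons_append, List.nil_append]

theorem pv_count_ded (x : String) (xs : List String) : ∀ (s : List String),
    (pvDed s xs).count x = if x ∈ xs ∧ x ∉ s then 1 else 0 := by
  induction xs with
  | nil => intro s; simp [pvDed]
  | cons y ys ih =>
    intro s
    by_cases hc : PySem.Set.contains s y
    · have hy : y ∈ s := by simpa [PySem.Set.contains] using hc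
      rw [pvDed, if_pos hc, ih]
      by_cases hxy : x = y
      · subst hxy; simp [hy]
      · simp [List.mem_cons, hxy]
    · have hy : y ∉ s := by simpa [PySem.Set.contains] using hc
      rw [pvDed, if_neg hc, List.count_cons, ih]
      by_cases hxy : x = y
      · subst hxy
        rw [if_neg (fun h => h.2 (List.mem_append.mpr (Or.inr (List.mem_singleton.mpr rfl)))),
          if_pos (⟨List.mem_cons.mpr (Or.inl rfl), hy⟩ : x ∈ x :: ys ∧ x ∉ s)]
        simp
      · have h2 : (x ∈ ys ∧ x ∉ s ++ [y]) ↔ (x ∈ y :: ys ∧ x ∉ s) := by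
          simp [List.mem_append, List.mem_cons, hxy]
        rw [if_congr h2 rfl rfl]
        simp [hxy, Ne.symm hxy]

theorem pv_ded_append (xs ys : List String) : ∀ (s : List String),
    pvDed s (xs ++ ys) = pvDed s xs ++ pvDed (s ++ pvDed s xs) ys := by
  induction xs with
  | nil => intro s; simp [pvDed]
  | cons x xs ih =>
    intro s
    by_cases hc : PySem.Set.contains s x
    · simp only [List.cons_append, pvDed, hc, if_pos, ih]
    · rw [List.cons_append, pvDed, if_neg hc, pvDed, if_neg hc, ih]
      simp [List.append_assoc]

theorem pv_ded_ded (xs : List String) : ∀ (t s : List String), (∀ x ∈ t, x ∈ s) →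
    pvDed s (pvDed t xs) = pvDed s xs := by
  induction xs with
  | nil => intro t s _; simp [pvDed]
  | cons x xs ih =>
    intro t s hts
    by_cases ht : PySem.Set.contains t x
    · have hxt : x ∈ t := by simpa [PySem.Set.contains] using ht
      have hxs : PySem.Set.contains s x = true := by
        simpa [PySem.Set.contains] using hts x hxt
      rw [pvDed, if_pos ht, ih t s hts, pvDed, if_pos hxs]
    · rw [pvDed, if_neg ht]
      by_cases hs : PySem.Set.contains s x
      · rw [pvDed, if_pos hs, pvDed, if_pos hs]
        exact ih (t ++ [x]) s (by
          intro y hy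
          rcases List.mem_append.mp hy with h | h
          · exact hts y h
          · simpa [PySem.Set.contains, List.mem_singleton.mp h] using hs)
      · rw [pvDed, if_neg hs, pvDed, if_neg hs]
        congr 1
        exact ih (t ++ [x]) (s ++ [x]) (by
          intro y hy
          rcases List.mem_append.mp hy with h | h
          · exact List.mem_append.mpr (Or.inl (hts y h))
          · exact List.mem_append.mpr (Or.inr h))

-- dedup of a concatenation is unchanged if each chunk is pre-deduplicated
theorem pv_ded_flatMap {α : Type} (g : α → List String) (L : List α) : ∀ (s : List String),
    pvDed s (L.flatMap (fun p => pvDed [] (g p))) = pvDed s (L.flatMap g) := by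
  induction L with
  | nil => intro s; simp [pvDed]
  | cons p L ih =>
    intro s
    rw [List.flatMap_cons, List.flatMap_cons, pv_ded_append, pv_ded_append,
      pv_ded_ded (g p) [] s (by simp), ih]

-- A's inner loop: the seen-set is the fold of Set.add over the cleaned nonempty
-- names, and the counts dict is an insert-counting fold over their relative dedup.
theorem pv_inner (cs : List String) : ∀ (seen : PySem.Set String) (d : PySem.Dict String Int),
    cs.foldl
      (fun (acc : PySem.Set String × PySem.Dict String Int) raw_name =>
        if PySem.Str.strip raw_name = "" ∨ PySem.Set.contains acc.1 (PySem.Str.strip raw_name) then acc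
        else (PySem.Set.add acc.1 (PySem.Str.strip raw_name),
              acc.2.insert (PySem.Str.strip raw_name) (acc.2.getD (PySem.Str.strip raw_name) 0 + 1)))
      (seen, d)
    = (((cs.map PySem.Str.strip).filter (fun n => n ≠ "")).foldl PySem.Set.add seen,
       (pvDed seen ((cs.map PySem.Str.strip).filter (fun n => n ≠ ""))).foldl
         (fun d x => d.insert x (d.getD x 0 + 1)) d) := by
  induction cs with
  | nil => intro seen d; simp [pvDed]
  | cons c cs ih =>
    intro seen d
    simp only [List.foldl_cons, List.map_cons, List.filter_cons]
    by_cases hn : PySem.Str.strip c = ""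
    · rw [if_pos (Or.inl hn), ih]
      simp [hn]
    · by_cases hm : PySem.Str.strip c ∈ seen
      · have hc : PySem.Set.contains seen (PySem.Str.strip c) = true := by
          simp [PySem.Set.contains, hm]
        have hadd : PySem.Set.add seen (PySem.Str.strip c) = seen := by
          simp [PySem.Set.add, PySem.Set.contains, hm]
        rw [if_pos (Or.inr hc), ih]
        simp [hn, pvDed, hc, hm, hadd]
      · have hc : PySem.Set.contains seen (PySem.Str.strip c) = false := by
          simp [PySem.Set.contains, hm]
        have hadd : PySem.Set.add seen (PySem.Str.strip c) = seen ++ [PySem.Str.strip c] := by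
          simp [PySem.Set.add, PySem.Set.contains, hm]
        rw [if_neg (by simp [hn, PySem.Set.contains, hm]), hadd, ih]
        simp [hn, pvDed, hc, hm]

theorem pv_foldl_flatMap {α β : Type} (g : α → List String)
    (f : β → String → β) (l : List α) :
    ∀ (d : β), (l.flatMap g).foldl f d = l.foldl (fun d x => (g x).foldl f d) d := by
  induction l with
  | nil => intro d; simp
  | cons x xs ih => intro d; simp [List.flatMap_cons, List.foldl_append, ih]

-- B's inner loop adds the nonempty names to the order list, i.e. folds Set.add
-- over the filtered list.
theorem pv_inner_b (lst : List String) : ∀ (order : List String),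
    lst.foldl (fun order name => if name ≠ "" ∧ name ∉ order then order ++ [name] else order) order
    = (lst.filter (fun n => n ≠ "")).foldl PySem.Set.add order := by
  induction lst with
  | nil => intro order; simp
  | cons x xs ih =>
    intro order
    by_cases hn : x = ""
    · simp [hn, List.filter_cons, ih]
    · by_cases hm : x ∈ order
      · simp [List.filter_cons, hn, hm, ih, PySem.Set.add, PySem.Set.contains]
      · simp [List.filter_cons, hn, hm, ih, PySem.Set.add, PySem.Set.contains]

theorem pv_count_flatMap {α : Type} (g : α → List String) (x : String) (L : List α) :
    (L.flatMap g).count x = (L.map (fun p => (g p).count x)).sum := by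
  induction L with
  | nil => simp
  | cons p L ih => simp [List.flatMap_cons, List.count_append, ih]

theorem pv_sum_ind {α : Type} (P : α → Prop) [DecidablePred P] (L : List α) :
    (L.map (fun p => if P p then 1 else 0)).sum = L.countP (fun p => decide (P p)) := by
  induction L with
  | nil => simp
  | cons p L ih =>
    by_cases hp : P p
    · simp [hp, ih, Nat.add_comm]
    · simp [hp, ih]

theorem pv_ofList_eq_ded (xs : List String) : PySem.Set.ofList xs = pvDed [] xs := by
  rw [PySem.Set.ofList_eq_foldl, pv_foldl_add]
  simp

theorem pv_foldl_funext {α β : Type} (l : List α) (f g : β → α → β) (b : β)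
    (h : ∀ c a, f c a = g c a) : l.foldl f b = l.foldl g b := by
  have : f = g := funext fun c => funext fun a => h c a
  rw [this]

theorem build_character_presence_map_eq (dj : List (String × List (List (String × List String)))) :
    build_character_presence_map dj = build_character_presence_map_alt dj := by
  unfold build_character_presence_map build_character_presence_map_alt
  simp only []
  generalize ((PySem.Dict.mk dj).get? "story_points").getD [] = L
  -- A's fold builds Counter of the per-point deduplicated cleaned-name stream
  have hA : L.foldl
      (fun counts story_point =>
        ((((PySem.Dict.mk story_point).get? "characters").getD []).foldl
          (fun (acc : PySem.Set String × PySem.Dict String Int) raw_name =>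
            if PySem.Str.strip raw_name = "" ∨ PySem.Set.contains acc.1 (PySem.Str.strip raw_name) then acc
            else (PySem.Set.add acc.1 (PySem.Str.strip raw_name),
                  acc.2.insert (PySem.Str.strip raw_name) (acc.2.getD (PySem.Str.strip raw_name) 0 + 1)))
          (PySem.Set.empty, counts)).2)
      PySem.Dict.empty
      = PySem.Dict.counter (L.flatMap (fun p =>
          pvDed [] (((((PySem.Dict.mk p).get? "characters").getD []).map PySem.Str.strip).filter (fun n => n ≠ "")))) := by
    rw [← PySem.Dict.foldl_insert_getD_add_one_eq_counter, pv_foldl_flatMap]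
    apply pv_foldl_funext
    intro counts p
    rw [pv_inner]
    rfl
  rw [hA, PySem.Dict.items_counter]
  -- B's order fold builds set(flatten of the filtered cleaned lists)
  have hB : (L.map (fun sp => (((PySem.Dict.mk sp).get? "characters").getD []).map PySem.Str.strip)).foldl
      (fun order lst =>
        lst.foldl (fun order name => if name ≠ "" ∧ name ∉ order then order ++ [name] else order) order)
      []
      = PySem.Set.ofList (L.flatMap (fun p =>
          ((((PySem.Dict.mk p).get? "characters").getD []).map PySem.Str.strip).filter (fun n => n ≠ ""))) := by
    rw [List.foldl_map, PySem.Set.ofList_eq_foldl, pv_foldl_flatMap]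
    apply pv_foldl_funext
    intro order p
    rw [pv_inner_b]
  rw [hB]
  -- the two streams have the same first-occurrence set
  have hST : PySem.Set.ofList (L.flatMap (fun p =>
        pvDed [] (((((PySem.Dict.mk p).get? "characters").getD []).map PySem.Str.strip).filter (fun n => n ≠ ""))))
      = PySem.Set.ofList (L.flatMap (fun p =>
        ((((PySem.Dict.mk p).get? "characters").getD []).map PySem.Str.strip).filter (fun n => n ≠ ""))) := by
    rw [pv_ofList_eq_ded, pv_ofList_eq_ded, pv_ded_flatMap]
  rw [hST]
  apply List.map_congr_left
  intro k hk
  have hkT : k ∈ L.flatMap (fun p =>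
      ((((PySem.Dict.mk p).get? "characters").getD []).map PySem.Str.strip).filter (fun n => n ≠ "")) := by
    simpa [PySem.Set.mem_ofList] using hk
  have hkne : k ≠ "" := by
    obtain ⟨p, _, hpk⟩ := List.mem_flatMap.mp hkT
    simpa using (List.mem_filter.mp hpk).2
  -- counts agree: per-point deduped stream count = number of point lists containing k
  have hcnt : (L.flatMap (fun p =>
      pvDed [] (((((PySem.Dict.mk p).get? "characters").getD []).map PySem.Str.strip).filter (fun n => n ≠ "")))).count k
      = (L.map (fun sp => (((PySem.Dict.mk sp).get? "characters").getD []).map PySem.Str.strip)).countP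
          (fun lst => decide (k ∈ lst)) := by
    rw [pv_count_flatMap, List.countP_map]
    have h1 : (L.map (fun p =>
        (pvDed [] (((((PySem.Dict.mk p).get? "characters").getD []).map PySem.Str.strip).filter (fun n => n ≠ ""))).count k))
        = L.map (fun p => if k ∈ ((((PySem.Dict.mk p).get? "characters").getD []).map PySem.Str.strip) then 1 else 0) := by
      apply List.map_congr_left
      intro p _
      rw [pv_count_ded]
      exact if_congr (by simp [List.mem_filter, hkne]) rfl rfl
    rw [h1, pv_sum_ind]
    rfl
  simp only [hcnt]
-- ===== VERDICT (by name: the statement is the Claim_ definition above) =====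
theorem build_character_presence_map_spec : Claim_equal_build_character_presence_map := by
  intro dj _
  exact build_character_presence_map_eq dj
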